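-- pv_equiv track=rewrite | github.com/OneOhCloud/one-geosite | china_domain_analyzer.py | get_domain_list
-- ===== SOURCE A (Python) =====
-- def get_domain_list(domain_list: list[str]):
--     """获取域名列表"""
--     domain_suffix = set()
--     for domain in domain_list:
--         # 获取域名后缀
--         if domain.count(".") > 1:
--             # 取最后两级域名
--             domain_suffix.add(".".join(domain.split(".")[-2:]))
--
--     summary = {}
--     for domain_suffix_item in domain_suffix:
--         if domain_suffix_item not in summary:
--             summary[domain_suffix_item] = 0
--
--         for domain in domain_list:
--             if domain.endswith(domain_suffix_item):
--                 summary[domain_suffix_item] += 1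
--     ready_delete_domain_list = []
--     data = []
--
--     for item, count in summary.items():
--         if count >= 2:
--             for domain in domain_list:
--                 if domain.endswith(item):
--                     ready_delete_domain_list.append(domain)
--             data.append(item)
--
--     for domain in domain_list:
--         if domain in ready_delete_domain_list:
--             continue
--         data.append(domain)
--
--     return data
-- ===== SOURCE B (Python) =====
-- def get_domain_list(domain_list: list[str]):
--     """获取域名列表 — hash-index over string suffixes instead of nested endswith scans"""
--     counts = {}
--     for d in domain_list:
--         if d.count(".") > 1:
--             counts.setdefault(".".join(d.split(".")[-2:]), 0)
--     matches = []
--     for d in domain_list: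
--         m = [d[i:] for i in range(len(d) + 1) if d[i:] in counts]
--         for t in m:
--             counts[t] += 1
--         matches.append(m)
--     data = [s for s, c in counts.items() if c >= 2]
--     grouped = set(data)
--     for d, m in zip(domain_list, matches):
--         if not any(t in grouped for t in m):
--             data.append(d)
--     return data
-- ===== Notes on version B (the rewrite author's own statement) =====
-- stated objective: alternative
-- what changed: A matches every candidate 2-level suffix against the whole list with nested endswith scans (and rescans the list once more per grouped suffix); B builds one dictionary of suffix counts in a single pass by looking up each domain's own string-suffixes in it, so the inner scans over the domain list disappear; Pre_ excludes inputs with two or more grouped suffixes, where A's output order is its set-iteration (hash) order.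
import Mathlib
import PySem

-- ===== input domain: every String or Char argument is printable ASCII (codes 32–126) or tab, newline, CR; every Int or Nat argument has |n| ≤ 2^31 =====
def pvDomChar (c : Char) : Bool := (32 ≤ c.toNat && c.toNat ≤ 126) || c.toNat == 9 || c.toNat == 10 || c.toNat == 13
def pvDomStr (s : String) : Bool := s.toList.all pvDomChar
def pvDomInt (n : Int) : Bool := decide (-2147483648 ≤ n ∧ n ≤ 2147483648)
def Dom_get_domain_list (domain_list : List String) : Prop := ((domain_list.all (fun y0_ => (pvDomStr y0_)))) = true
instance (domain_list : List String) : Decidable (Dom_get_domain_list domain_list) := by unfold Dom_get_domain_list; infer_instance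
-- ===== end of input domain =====

-- B replaces A's nested endswith scans (every candidate suffix rescanned against the whole list, plus one more rescan
-- per grouped suffix) by one dictionary of suffix counts indexed by each domain's own string-suffixes: alternative algorithm.
-- Pre_ only excludes inputs whose output order depends on Python's set-iteration (hash) order; see the comment at Pre_.


set_option maxHeartbeats 800000

-- shared helper: ".".join(domain.split(".")[-2:])  (the ".getD []" is dead code: split? is none only for sep = "")
def pvSuffix2 (d : String) : String :=
  PySem.Str.join "." (PySem.List.slice ((PySem.Str.split? d ".").getD []) (some (-2)) none)

-- ===== PORT A =====
def get_domain_list (domain_list : List String) : List String :=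
  let domain_suffix : PySem.Set String :=
    domain_list.foldl
      (fun s d => if PySem.Str.count d "." > 1 then PySem.Set.add s (pvSuffix2 d) else s)
      PySem.Set.empty
  let summary : PySem.Dict String Int :=
    domain_suffix.foldl
      (fun sm it =>
        domain_list.foldl
          (fun sm' d => if PySem.Str.endswith d it then sm'.modify it 0 (· + 1) else sm')
          (if sm.contains it then sm else sm.insert it 0))
      PySem.Dict.empty
  let pr : List String × List String :=
    summary.items.foldl
      (fun pr itc =>
        if itc.2 ≥ 2 then
          (domain_list.foldl (fun r d => if PySem.Str.endswith d itc.1 then r ++ [d] else r) pr.1,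
           pr.2 ++ [itc.1])
        else pr)
      ([], [])
  domain_list.foldl (fun data d => if pr.1.contains d then data else data ++ [d]) pr.2

-- ===== PORT B =====
def get_domain_list_alt (domain_list : List String) : List String :=
  let counts0 : PySem.Dict String Int :=
    domain_list.foldl
      (fun c d => if PySem.Str.count d "." > 1 then c.setdefault (pvSuffix2 d) 0 else c)
      PySem.Dict.empty
  let cm : PySem.Dict String Int × List (List String) :=
    domain_list.foldl
      (fun cm d =>
        let m : List String :=
          (PySem.List.pyRange 0 (PySem.Str.len d + 1) 1).filterMap
            (fun i =>
              if cm.1.contains (PySem.Str.slice d (some i) none) then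
                some (PySem.Str.slice d (some i) none)
              else none)
        (m.foldl (fun c t => c.modify t 0 (· + 1)) cm.1, cm.2 ++ [m]))
      (counts0, [])
  let data0 : List String := (cm.1.items.filter (fun sc => sc.2 ≥ 2)).map (·.1)
  let grouped : PySem.Set String := PySem.Set.ofList data0
  (domain_list.zip cm.2).foldl
    (fun data dm => if dm.2.any (fun t => grouped.contains t) then data else data ++ [dm.1])
    data0

-- ===== PRECONDITION & SPEC =====
-- Pre_ excludes exactly the inputs with TWO OR MORE grouped suffixes (distinct 2-level suffixes each matching ≥ 2 list
-- entries): there Python A's output order is its set-iteration (hash) order, an accident no port should pin down;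
-- with at most one grouped suffix the output is order-independent.  It is not a size bound and it excludes no crash.
def Pre_get_domain_list (domain_list : List String) : Prop :=
  ((PySem.Set.ofList ((domain_list.filter (fun d => decide (1 < PySem.Str.count d "."))).map pvSuffix2)).filter
      (fun s => decide (2 ≤ (domain_list.countP (fun d => PySem.Str.endswith d s) : Int)))).length ≤ 1
instance (domain_list : List String) : Decidable (Pre_get_domain_list domain_list) := by
  unfold Pre_get_domain_list; infer_instance
def pvWitness_get_domain_list : List String := ["a.b.com", "c.b.com", "x.y", "q"]
def Spec_get_domain_list (domain_list : List String) (out : List String) : Prop := out = get_domain_list_alt domain_list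
instance (domain_list : List String) (out : List String) : Decidable (Spec_get_domain_list domain_list out) := by unfold Spec_get_domain_list; infer_instance

-- ===== CLAIM (what is proved, stated in full; the proofs are below) =====
def Claim_equal_get_domain_list : Prop := ∀ (domain_list : List String), Dom_get_domain_list domain_list → Pre_get_domain_list domain_list → Spec_get_domain_list domain_list (get_domain_list domain_list)

-- ===== LEMMAS AND PROOFS =====
-- The common normal form both ports are reduced to.  The Lean ports agree on ALL inputs; Pre_ is only needed for
-- faithfulness of port A to the hash-order-dependent Python A, so the proofs below never need to use it.
def pvQual (d : String) : Bool := decide (1 < PySem.Str.count d ".")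
def pvXs (L : List String) : List String := (L.filter pvQual).map pvSuffix2
def pvK (L : List String) : List String := PySem.Set.ofList (pvXs L)
def pvCnt (L : List String) (s : String) : Int := (L.countP (fun d => PySem.Str.endswith d s) : Int)
def pvG (L : List String) : List String := (pvK L).filter (fun s => decide (2 ≤ pvCnt L s))
def pvModel (L : List String) : List String :=
  pvG L ++ L.filter (fun d => !((pvG L).any (fun s => PySem.Str.endswith d s)))

-- all string-suffixes of d, longest first (what B's inner comprehension enumerates)
def pvSufs (d : String) : List String :=
  (List.range (d.toList.length + 1)).map (fun i : Nat => PySem.Str.slice d (some (i : Int)) none)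

-- B's inner comprehension with the dict lookup replaced by list membership (the dict's keys are constant)
def pvM (K : List String) (d : String) : List String :=
  (PySem.List.pyRange 0 (PySem.Str.len d + 1) 1).filterMap
    (fun i =>
      if (PySem.Str.slice d (some i) none) ∈ K then some (PySem.Str.slice d (some i) none) else none)

-- ## generic helpers ##
theorem pv_filterMap_ite {α β : Type} (l : List α) (f : α → β) (p : β → Prop) [DecidablePred p] :
    l.filterMap (fun i => if p (f i) then some (f i) else none) = (l.map f).filter (fun b => decide (p b)) := by
  induction l with
  | nil => rfl
  | cons a l ih => by_cases h : p (f a) <;> simp [h, ih]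

theorem pv_update_of_subset {α : Type} [BEq α] [LawfulBEq α] (s : PySem.Set α) (xs : List α)
    (h : ∀ x ∈ xs, x ∈ s) : PySem.Set.update s xs = s := by
  rw [PySem.Set.update_eq_append_filter]
  have hnil : List.filter (fun y => !PySem.Set.contains s y) (PySem.Set.ofList xs) = [] := by
    rw [List.filter_eq_nil_iff]
    intro a ha
    have hmem := h a ((PySem.Set.mem_ofList xs a).1 ha)
    simp [hmem]
  rw [hnil, List.append_nil]

theorem pv_zip_self_map (L : List String) (f : String → List String) :
    L.zip (L.map f) = L.map (fun d => (d, f d)) := by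
  induction L with
  | nil => rfl
  | cons a l ih => simp [ih]

theorem pv_slice_toList (d : String) (i : Nat) :
    (PySem.Str.slice d (some (i : Int)) none).toList = d.toList.drop i := by
  simp [PySem.Str.toList_slice, PySem.Chars.slice_eq_listSlice, PySem.List.slice_from_natCast]

-- ## suffix-list facts ##
theorem pvSufs_mem (d t : String) : t ∈ pvSufs d ↔ PySem.Str.endswith d t = true := by
  rw [PySem.Str.endswith_eq, PySem.Chars.endswith_iff]
  unfold pvSufs
  simp only [List.mem_map, List.mem_range]
  constructor
  · rintro ⟨i, hi, rfl⟩
    rw [pv_slice_toList]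
    exact List.drop_suffix i _
  · intro h
    refine ⟨d.toList.length - t.toList.length, by omega, ?_⟩
    rw [← String.toList_inj, pv_slice_toList]
    exact (List.suffix_iff_eq_drop.1 h).symm

theorem pvSufs_nodup (d : String) : (pvSufs d).Nodup := by
  unfold pvSufs
  apply List.Nodup.map_on _ List.nodup_range
  intro x hx y hy hxy
  have hx' := List.mem_range.1 hx
  have hy' := List.mem_range.1 hy
  have hdrop : d.toList.drop x = d.toList.drop y := by
    rw [← pv_slice_toList d x, ← pv_slice_toList d y, hxy]
  have hl := congrArg List.length hdrop
  simp only [List.length_drop] at hl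
  omega

theorem pv_pvM_eq_filter (K : List String) (d : String) :
    pvM K d = (pvSufs d).filter (fun t => decide (t ∈ K)) := by
  unfold pvM pvSufs
  have hlen : PySem.Str.len d + 1 = ((d.toList.length + 1 : Nat) : Int) := by
    rw [PySem.Str.len_eq]; push_cast; ring
  rw [hlen, PySem.List.pyRange_zero_nat, List.filterMap_map]
  simp only [Function.comp_def]
  exact pv_filterMap_ite (List.range (d.toList.length + 1))
    (fun i : Nat => PySem.Str.slice d (some (i : Int)) none) (fun t => t ∈ K)

theorem pv_pvM_mem (K : List String) (d t : String) :
    t ∈ pvM K d ↔ t ∈ K ∧ PySem.Str.endswith d t = true := by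
  rw [pv_pvM_eq_filter, List.mem_filter, pvSufs_mem]
  simp [and_comm]

theorem pv_count_pvM (L : List String) (k : String) (hk : k ∈ pvK L) (d : String) :
    ((pvM (pvK L) d).count k : Int) = if PySem.Str.endswith d k then 1 else 0 := by
  rw [pv_pvM_eq_filter, List.count_filter (by simp [hk])]
  by_cases h : PySem.Str.endswith d k
  · rw [if_pos h, List.count_eq_one_of_mem (pvSufs_nodup d) ((pvSufs_mem d k).2 h)]
    simp
  · rw [if_neg h, List.count_eq_zero_of_not_mem (fun hmem => h ((pvSufs_mem d k).1 hmem))]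
    simp

-- ## reduction of PORT A ##
theorem pv_setA (L : List String) :
    L.foldl (fun s d => if PySem.Str.count d "." > 1 then PySem.Set.add s (pvSuffix2 d) else s)
      PySem.Set.empty = pvK L := by
  rw [PySem.List.foldl_ite_eq_foldl_filter (p := fun d => PySem.Str.count d "." > 1)
        (f := fun s d => PySem.Set.add s (pvSuffix2 d)),
      ← PySem.Set.update_map_eq_foldl_add]
  rw [show (PySem.Set.empty : PySem.Set String) = [] from rfl, PySem.Set.update_nil_left]
  rfl

theorem pv_innerA (L : List String) (it : String) (D : PySem.Dict String Int) :
    L.foldl (fun sm' d => if PySem.Str.endswith d it then sm'.modify it 0 (· + 1) else sm') D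
    = ((L.filter (fun d => PySem.Str.endswith d it)).map (fun _ => it)).foldl
        (fun sm x => sm.modify x 0 (· + 1)) D := by
  rw [List.foldl_map]
  exact PySem.List.foldl_if_eq_foldl_filter (fun d => PySem.Str.endswith d it)
    (fun sm _ => sm.modify it 0 (· + 1)) L D

theorem pv_modifyFold_getD_ne (k : String) :
    ∀ (xs : List String) (D : PySem.Dict String Int), (∀ x ∈ xs, x ≠ k) →
      (xs.foldl (fun sm x => sm.modify x 0 (· + 1)) D).getD k 0 = D.getD k 0 := by
  intro xs
  induction xs with
  | nil => intro D _; rfl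
  | cons a xs ih =>
    intro D h
    rw [List.foldl_cons, ih _ (fun x hx => h x (List.mem_cons_of_mem a hx))]
    exact PySem.Dict.getD_modify_of_ne D 0 _ (fun he => (h a List.mem_cons_self) he.symm)

theorem pv_outerA (L : List String) : ∀ (ks : List String) (D : PySem.Dict String Int),
    ks.Nodup → (∀ k ∈ ks, k ∉ D.keys) →
    ((ks.foldl (fun sm it =>
        L.foldl (fun sm' d => if PySem.Str.endswith d it then sm'.modify it 0 (· + 1) else sm')
          (if sm.contains it then sm else sm.insert it 0)) D).keys
      = D.keys ++ ks)
    ∧ (∀ k, (ks.foldl (fun sm it =>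
        L.foldl (fun sm' d => if PySem.Str.endswith d it then sm'.modify it 0 (· + 1) else sm')
          (if sm.contains it then sm else sm.insert it 0)) D).getD k 0
      = if k ∈ ks then pvCnt L k else D.getD k 0) := by
  intro ks
  induction ks with
  | nil => intro D _ _; simp
  | cons it ks ih =>
    intro D hnd hfresh
    have hitD : it ∉ D.keys := hfresh it List.mem_cons_self
    have hit : D.contains it = false := by
      rw [← Bool.not_eq_true]
      intro hc; exact hitD ((PySem.Dict.contains_iff_mem_keys D it).1 hc)
    simp only [List.foldl_cons, hit, Bool.false_eq_true, if_false]
    set D1 := L.foldl (fun sm' d => if PySem.Str.endswith d it then sm'.modify it 0 (· + 1) else sm')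
        (D.insert it 0) with hD1
    have hkeys1 : D1.keys = D.keys ++ [it] := by
      rw [hD1, pv_innerA, PySem.Dict.keys_foldl_modify,
          PySem.Dict.keys_insert_of_not_contains D 0 hit]
      apply pv_update_of_subset
      intro x hx
      rcases List.mem_map.1 hx with ⟨_, _, rfl⟩
      exact List.mem_append_right _ (List.mem_singleton.2 rfl)
    have hgd1_self : D1.getD it 0 = pvCnt L it := by
      rw [hD1, pv_innerA, show (fun _ : String => it) = Function.const String it from rfl,
          List.map_const, PySem.Dict.getD_foldl_modify_add_one, PySem.Dict.getD_insert,
          if_pos rfl, List.count_replicate]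
      simp [pvCnt, List.countP_eq_length_filter]
    have hgd1_ne : ∀ k, k ≠ it → D1.getD k 0 = D.getD k 0 := by
      intro k hkne
      rw [hD1, pv_innerA, pv_modifyFold_getD_ne k _ _ ?hne, PySem.Dict.getD_insert, if_neg hkne]
      case hne =>
        intro x hx
        rcases List.mem_map.1 hx with ⟨_, _, rfl⟩
        exact fun he => hkne he.symm
    have hfresh' : ∀ k ∈ ks, k ∉ D1.keys := by
      intro k hk hmem
      rw [hkeys1] at hmem
      rcases List.mem_append.1 hmem with h1 | h2
      · exact hfresh k (List.mem_cons_of_mem it hk) h1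
      · exact (List.nodup_cons.1 hnd).1 (List.mem_singleton.1 h2 ▸ hk)
    obtain ⟨ihk, ihg⟩ := ih D1 (List.nodup_cons.1 hnd).2 hfresh'
    refine ⟨?_, ?_⟩
    · rw [ihk, hkeys1, List.append_assoc, List.singleton_append]
    · intro k
      rw [ihg k]
      by_cases hks : k ∈ ks
      · simp [hks, List.mem_cons]
      · rw [if_neg hks]
        by_cases hkit : k = it
        · subst hkit
          rw [hgd1_self]
          simp [List.mem_cons]
        · rw [hgd1_ne k hkit, if_neg (by simp [hkit, hks])]

theorem pv_summaryA (L : List String) :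
    (List.foldl (fun sm it =>
        L.foldl (fun sm' d => if PySem.Str.endswith d it then sm'.modify it 0 (· + 1) else sm')
          (if sm.contains it then sm else sm.insert it 0))
      PySem.Dict.empty (pvK L)).items
    = (pvK L).map (fun s => (s, pvCnt L s)) := by
  obtain ⟨hk, hg⟩ := pv_outerA L (pvK L) PySem.Dict.empty (PySem.Set.nodup_ofList _)
    (by simp [PySem.Dict.keys_empty])
  rw [PySem.Dict.items_eq_map_keys _ (by rw [hk, PySem.Dict.keys_empty, List.nil_append]; exact PySem.Set.nodup_ofList _) 0,
      hk, PySem.Dict.keys_empty, List.nil_append]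
  apply List.map_congr_left
  intro s hs
  rw [hg s, if_pos hs]

theorem pv_pairsA (L K : List String) :
    List.foldl (fun pr itc => if itc.2 ≥ 2 then
        (List.foldl (fun r d => if PySem.Str.endswith d itc.1 then r ++ [d] else r) pr.1 L, pr.2 ++ [itc.1])
      else pr) (([] : List String), ([] : List String)) (K.map (fun s => (s, pvCnt L s)))
    = ((K.filter (fun s => decide (2 ≤ pvCnt L s))).flatMap (fun s => L.filter (fun d => PySem.Str.endswith d s)),
        K.filter (fun s => decide (2 ≤ pvCnt L s))) := by
  rw [List.foldl_map]
  have hcg : ∀ (acc : List String × List String), ∀ s ∈ K,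
      (if ((s, pvCnt L s) : String × Int).2 ≥ 2 then
        (List.foldl (fun r d => if PySem.Str.endswith d ((s, pvCnt L s) : String × Int).1 then r ++ [d] else r) acc.1 L,
         acc.2 ++ [((s, pvCnt L s) : String × Int).1])
      else acc)
      = ((if 2 ≤ pvCnt L s then acc.1 ++ L.filter (fun d => PySem.Str.endswith d s) else acc.1),
         (if 2 ≤ pvCnt L s then acc.2 ++ [s] else acc.2)) := by
    intro acc s _
    by_cases h : 2 ≤ pvCnt L s
    · dsimp only
      rw [if_pos h, if_pos h, if_pos h, PySem.List.foldl_append_if_eq_filter]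
    · dsimp only
      rw [if_neg h, if_neg h, if_neg h]
  rw [PySem.List.foldl_congr_mem K _
      (fun acc s => ((if 2 ≤ pvCnt L s then acc.1 ++ L.filter (fun d => PySem.Str.endswith d s) else acc.1),
                     (if 2 ≤ pvCnt L s then acc.2 ++ [s] else acc.2))) ([], []) hcg]
  rw [PySem.List.foldl_prod_mk
      (f := fun r s => if 2 ≤ pvCnt L s then r ++ L.filter (fun d => PySem.Str.endswith d s) else r)
      (g := fun t s => if 2 ≤ pvCnt L s then t ++ [s] else t)]
  simp only [Prod.mk.injEq]
  constructor
  · rw [PySem.List.foldl_ite_eq_foldl_filter (p := fun s => 2 ≤ pvCnt L s)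
        (f := fun r s => r ++ L.filter (fun d => PySem.Str.endswith d s)),
      PySem.List.foldl_append_eq_flatMap, List.nil_append]
  · rw [PySem.List.foldl_append_ite_eq_filter (p := fun s => 2 ≤ pvCnt L s), List.nil_append]

theorem pv_rdd_contains (L : List String) (d : String) (hd : d ∈ L) :
    (((pvK L).filter (fun s => decide (2 ≤ pvCnt L s))).flatMap
        (fun s => L.filter (fun x => PySem.Str.endswith x s))).contains d
    = ((pvK L).filter (fun s => decide (2 ≤ pvCnt L s))).any (fun s => PySem.Str.endswith d s) := by
  rw [Bool.eq_iff_iff, List.contains_iff_mem, List.any_eq_true]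
  simp only [List.mem_flatMap, List.mem_filter]
  constructor
  · rintro ⟨s, hs, _, he⟩; exact ⟨s, hs, he⟩
  · rintro ⟨s, hs, he⟩; exact ⟨s, hs, hd, he⟩

theorem pv_finalA (L G rdd : List String)
    (h : ∀ d ∈ L, rdd.contains d = G.any (fun s => PySem.Str.endswith d s)) :
    L.foldl (fun data d => if rdd.contains d then data else data ++ [d]) G
    = G ++ L.filter (fun d => !(G.any (fun s => PySem.Str.endswith d s))) := by
  have hcg : ∀ (acc : List String), ∀ x ∈ L,
      (if rdd.contains x then acc else acc ++ [x])
      = (if !(G.any (fun s => PySem.Str.endswith x s)) then acc ++ [x] else acc) := by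
    intro acc x hx
    rw [← h x hx]
    cases hc : rdd.contains x <;> simp
  rw [PySem.List.foldl_congr_mem L _
      (fun acc x => if !(G.any (fun s => PySem.Str.endswith x s)) then acc ++ [x] else acc) G hcg]
  exact PySem.List.foldl_append_if_eq_filter _ L G

theorem portA_eq_model (L : List String) : get_domain_list L = pvModel L := by
  unfold get_domain_list
  dsimp only
  rw [pv_setA, pv_summaryA, pv_pairsA]
  dsimp only
  rw [pv_finalA L _ _ (fun d hd => pv_rdd_contains L d hd)]
  rfl

-- ## reduction of PORT B ##
theorem pv_sd_keys : ∀ (xs : List String) (D : PySem.Dict String Int),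
    (List.foldl (fun c k => c.setdefault k 0) D xs).keys = PySem.Set.update D.keys xs := by
  intro xs
  induction xs with
  | nil => intro D; rw [List.foldl_nil, PySem.Set.update_nil]
  | cons x xs ih =>
    intro D
    rw [List.foldl_cons, PySem.Set.update_cons, ih]
    congr 1
    cases hc : D.contains x
    · rw [PySem.Dict.setdefault_of_not_contains D 0 hc,
          PySem.Dict.keys_insert_of_not_contains D 0 hc,
          PySem.Set.add_of_not_mem (fun hm => by
            have := (PySem.Dict.contains_iff_mem_keys D x).2 hm
            rw [hc] at this; exact Bool.false_ne_true this)]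
    · rw [PySem.Dict.setdefault_of_contains D 0 hc,
          PySem.Set.add_of_mem ((PySem.Dict.contains_iff_mem_keys D x).1 hc)]

theorem pv_sd_getD (k : String) : ∀ (xs : List String) (D : PySem.Dict String Int),
    (List.foldl (fun c k' => c.setdefault k' 0) D xs).getD k 0 = D.getD k 0 := by
  intro xs
  induction xs with
  | nil => intro D; rfl
  | cons x xs ih =>
    intro D
    rw [List.foldl_cons, ih]
    cases hc : D.contains x
    · rw [PySem.Dict.setdefault_of_not_contains D 0 hc, PySem.Dict.getD_insert]
      by_cases hkx : k = x
      · rw [if_pos hkx, hkx]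
        exact (PySem.Dict.getD_of_not_contains D 0 hc).symm
      · rw [if_neg hkx]
    · rw [PySem.Dict.setdefault_of_contains D 0 hc]

theorem pv_countsB (L : List String) :
    (List.foldl (fun c d => if PySem.Str.count d "." > 1 then c.setdefault (pvSuffix2 d) 0 else c)
        (PySem.Dict.empty : PySem.Dict String Int) L).keys = pvK L
  ∧ ∀ k, (List.foldl (fun c d => if PySem.Str.count d "." > 1 then c.setdefault (pvSuffix2 d) 0 else c)
        (PySem.Dict.empty : PySem.Dict String Int) L).getD k 0 = 0 := by
  have hstep : List.foldl (fun c d => if PySem.Str.count d "." > 1 then c.setdefault (pvSuffix2 d) 0 else c)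
        (PySem.Dict.empty : PySem.Dict String Int) L
      = List.foldl (fun c k => PySem.Dict.setdefault c k 0) (PySem.Dict.empty : PySem.Dict String Int)
          ((L.filter (fun d => decide (PySem.Str.count d "." > 1))).map pvSuffix2) := by
    rw [PySem.List.foldl_ite_eq_foldl_filter (p := fun d => PySem.Str.count d "." > 1)
          (f := fun c d => PySem.Dict.setdefault c (pvSuffix2 d) 0), List.foldl_map]
  constructor
  · rw [hstep]
    have h := pv_sd_keys ((L.filter (fun d => decide (PySem.Str.count d "." > 1))).map pvSuffix2)
      PySem.Dict.empty
    rw [PySem.Dict.keys_empty, PySem.Set.update_nil_left] at h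
    exact h
  · intro k
    rw [hstep, pv_sd_getD k]
    simp

theorem pv_pass2 (L : List String) : ∀ (l : List String) (D : PySem.Dict String Int) (ms : List (List String)),
    D.keys = pvK L →
    ∀ r : PySem.Dict String Int × List (List String),
      r = List.foldl (fun cm d =>
        (List.foldl (fun c t => c.modify t 0 (· + 1)) cm.1
          ((PySem.List.pyRange 0 (PySem.Str.len d + 1) 1).filterMap
            (fun i => if cm.1.contains (PySem.Str.slice d (some i) none) then
                some (PySem.Str.slice d (some i) none) else none)),
         cm.2 ++ [(PySem.List.pyRange 0 (PySem.Str.len d + 1) 1).filterMap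
            (fun i => if cm.1.contains (PySem.Str.slice d (some i) none) then
                some (PySem.Str.slice d (some i) none) else none)])) (D, ms) l →
      (r.1.keys = pvK L ∧ r.2 = ms ++ l.map (pvM (pvK L)) ∧
        ∀ k, r.1.getD k 0 = D.getD k 0 + (l.map (fun d => ((pvM (pvK L) d).count k : Int))).sum) := by
  intro l
  induction l with
  | nil =>
    intro D ms hD r hr
    subst hr
    exact ⟨hD, by simp, fun k => by simp⟩
  | cons d l ih =>
    intro D ms hD r hr
    have hm : ((PySem.List.pyRange 0 (PySem.Str.len d + 1) 1).filterMap
        (fun i => if D.contains (PySem.Str.slice d (some i) none) then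
            some (PySem.Str.slice d (some i) none) else none)) = pvM (pvK L) d := by
      simp only [pvM, PySem.Dict.contains_eq_decide_mem_keys, hD, decide_eq_true_eq]
    rw [List.foldl_cons] at hr
    dsimp only at hr
    rw [hm] at hr
    have hD'k : (List.foldl (fun c t => c.modify t 0 (· + 1)) D (pvM (pvK L) d)).keys = pvK L := by
      rw [PySem.Dict.keys_foldl_modify, hD]
      exact pv_update_of_subset _ _ (fun x hx => ((pv_pvM_mem _ _ _).1 hx).1)
    obtain ⟨h1, h2, h3⟩ := ih (List.foldl (fun c t => c.modify t 0 (· + 1)) D (pvM (pvK L) d))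
      (ms ++ [pvM (pvK L) d]) hD'k r hr
    refine ⟨h1, ?_, ?_⟩
    · rw [h2, List.map_cons]
      simp
    · intro k
      rw [h3 k, PySem.Dict.getD_foldl_modify_add_one, List.map_cons, List.sum_cons, add_assoc]

theorem pv_sumEq (L : List String) (k : String) (hk : k ∈ pvK L) :
    (L.map (fun d => ((pvM (pvK L) d).count k : Int))).sum = pvCnt L k := by
  rw [List.map_congr_left (fun d _ => pv_count_pvM L k hk d)]
  exact PySem.List.sum_map_ite_one_zero (fun d => PySem.Str.endswith d k) L

theorem pv_itemsOf (L : List String) (d : PySem.Dict String Int)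
    (hk : d.keys = pvK L)
    (hg : ∀ k, k ∈ pvK L → d.getD k 0 = pvCnt L k) :
    d.items = (pvK L).map (fun s => (s, pvCnt L s)) := by
  rw [PySem.Dict.items_eq_map_keys d (by rw [hk]; exact PySem.Set.nodup_ofList _) 0, hk]
  exact List.map_congr_left (fun s hs => by rw [hg s hs])

theorem pv_dataB (L : List String) :
    ((((pvK L).map (fun s => (s, pvCnt L s))).filter (fun sc => sc.2 ≥ 2)).map (fun sc => sc.1)) = pvG L := by
  rw [List.filter_map, List.map_map]
  simp only [Function.comp_def]
  simp [pvG, ge_iff_le]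

theorem portB_eq_model (L : List String) : get_domain_list_alt L = pvModel L := by
  unfold get_domain_list_alt
  dsimp only
  obtain ⟨hc0k, hc0g⟩ := pv_countsB L
  obtain ⟨hk1, hms, hgd⟩ := pv_pass2 L L _ [] hc0k _ rfl
  have hitems := pv_itemsOf L _ hk1
    (fun k hkmem => by rw [hgd k, hc0g k, pv_sumEq L k hkmem, zero_add])
  rw [hitems, pv_dataB, hms, List.nil_append, pv_zip_self_map, List.foldl_map]
  dsimp only
  have hcg : ∀ (acc : List String), ∀ x ∈ L,
      (if (pvM (pvK L) x).any (fun t => PySem.Set.contains (PySem.Set.ofList (pvG L)) t) then acc else acc ++ [x])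
      = (if !((pvG L).any (fun s => PySem.Str.endswith x s)) then acc ++ [x] else acc) := by
    intro acc x _
    have hc : (pvM (pvK L) x).any (fun t => PySem.Set.contains (PySem.Set.ofList (pvG L)) t)
        = (pvG L).any (fun s => PySem.Str.endswith x s) := by
      rw [Bool.eq_iff_iff]
      simp only [List.any_eq_true, PySem.Set.contains_iff, PySem.Set.mem_ofList]
      constructor
      · rintro ⟨t, htm, htg⟩
        exact ⟨t, htg, ((pv_pvM_mem _ _ _).1 htm).2⟩
      · rintro ⟨s, hsg, hse⟩
        exact ⟨s, (pv_pvM_mem _ _ _).2 ⟨List.mem_of_mem_filter hsg, hse⟩, hsg⟩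
    rw [hc]
    cases (pvG L).any (fun s => PySem.Str.endswith x s) <;> simp
  rw [PySem.List.foldl_congr_mem L _
      (fun acc x => if !((pvG L).any (fun s => PySem.Str.endswith x s)) then acc ++ [x] else acc)
      (pvG L) hcg]
  rw [PySem.List.foldl_append_if_eq_filter]
  rfl

-- ===== VERDICT (by name: the statement is the Claim_ definition above) =====
theorem get_domain_list_spec : Claim_equal_get_domain_list := by
  intro L _ _
  unfold Spec_get_domain_list
  rw [portA_eq_model, portB_eq_model]
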